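-- pv_equiv track=rewrite | github.com/eisenluk/mist-campus-fabric-ip-clos | evpn_ip_clos.py | _build_pod_names
-- ===== SOURCE A (Python) =====
-- from typing import Dict, Any, List, Tuple, Optional
--
-- def _build_pod_names(switches: List[Dict[str, Any]]) -> Dict[str, str]:
--     """Extract unique pod numbers and create pod names"""
--     pod_numbers = set()
--     for sw in switches:
--         if sw.get("pod") is not None:
--             pod_numbers.add(sw["pod"])
--
--     if not pod_numbers:
--         return {}
--
--     return {str(p): f"Pod {p}" for p in sorted(pod_numbers)}
-- ===== SOURCE B (Python) =====
-- from typing import Dict, Any, List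
--
-- def _build_pod_names(switches: List[Dict[str, Any]]) -> Dict[str, str]:
--     """Single pass: keep an ascending, duplicate-free list of pod numbers via ordered insertion, then label them."""
--     pods: list = []
--     for sw in switches:
--         p = sw.get("pod")
--         if p is None:
--             continue
--         i = 0
--         while i < len(pods) and pods[i] < p:
--             i += 1
--         if i == len(pods) or pods[i] != p:
--             pods.insert(i, p)
--     return {str(p): f"Pod {p}" for p in pods}
-- ===== Notes on version B (the rewrite author's own statement) =====
-- stated objective: alternative
-- what changed: Replaces A's set-accumulate + sorted() + dict-comprehension pipeline with a single pass that maintains an ascending duplicate-free list of pod numbers by ordered insertion, then labels it.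
import Mathlib
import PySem

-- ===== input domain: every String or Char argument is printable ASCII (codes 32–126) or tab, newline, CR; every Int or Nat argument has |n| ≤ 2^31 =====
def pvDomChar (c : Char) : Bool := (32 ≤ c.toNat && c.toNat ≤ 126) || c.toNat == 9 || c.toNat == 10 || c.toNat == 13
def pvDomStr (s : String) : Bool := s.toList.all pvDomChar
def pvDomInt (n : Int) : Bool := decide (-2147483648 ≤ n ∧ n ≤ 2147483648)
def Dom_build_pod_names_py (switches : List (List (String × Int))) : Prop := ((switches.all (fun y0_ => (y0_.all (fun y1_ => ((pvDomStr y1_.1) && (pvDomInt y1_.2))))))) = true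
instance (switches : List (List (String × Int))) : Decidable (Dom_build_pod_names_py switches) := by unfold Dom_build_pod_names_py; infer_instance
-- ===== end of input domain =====

-- B replaces A's set + sorted() + comprehension pipeline by one pass keeping an ascending
-- duplicate-free list of pod numbers via ordered insertion (alternative decomposition, not faster).

-- ===== PORT A =====
def build_pod_names_py (switches : List (List (String × Int))) : List (String × String) :=
  let pod_numbers : PySem.Set Int :=
    switches.foldl (fun s sw =>
      match PySem.Dict.get? (PySem.Dict.mk sw) "pod" with
      | some p => PySem.Set.add s p
      | none => s) PySem.Set.empty
  if pod_numbers = [] then []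
  else (PySem.List.sorted pod_numbers (fun x => x) false).map
    (fun p => (PySem.Int.toStr p, "Pod " ++ PySem.Int.toStr p))

-- ===== PORT B =====
-- the while-scan + insert of Source B: walk past smaller elements, drop duplicates, insert in place
def podInsert (p : Int) : List Int → List Int
  | [] => [p]
  | q :: qs => if q < p then q :: podInsert p qs
               else if q = p then q :: qs
               else p :: q :: qs

def build_pod_names_py_alt (switches : List (List (String × Int))) : List (String × String) :=
  let pods : List Int :=
    switches.foldl (fun pods sw =>
      match PySem.Dict.get? (PySem.Dict.mk sw) "pod" with
      | some p => podInsert p pods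
      | none => pods) []
  pods.map (fun p => (PySem.Int.toStr p, "Pod " ++ PySem.Int.toStr p))

-- ===== PRECONDITION & SPEC =====
def Spec_build_pod_names_py (switches : List (List (String × Int))) (out : List (String × String)) : Prop := out = build_pod_names_py_alt switches
instance (switches : List (List (String × Int))) (out : List (String × String)) : Decidable (Spec_build_pod_names_py switches out) := by unfold Spec_build_pod_names_py; infer_instance

-- ===== CLAIM (what is proved, stated in full; the proofs are below) =====
def Claim_equal_build_pod_names_py : Prop := ∀ (switches : List (List (String × Int))), Dom_build_pod_names_py switches → Spec_build_pod_names_py switches (build_pod_names_py switches)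

-- ===== LEMMAS AND PROOFS =====

-- both loops only look at the extracted pod numbers, in order
def podsOf (switches : List (List (String × Int))) : List Int :=
  switches.filterMap (fun sw => PySem.Dict.get? (PySem.Dict.mk sw) "pod")

lemma foldA_eq (switches : List (List (String × Int))) (s0 : PySem.Set Int) :
    switches.foldl (fun s sw =>
      match PySem.Dict.get? (PySem.Dict.mk sw) "pod" with
      | some p => PySem.Set.add s p
      | none => s) s0
    = (podsOf switches).foldl PySem.Set.add s0 := by
  induction switches generalizing s0 with
  | nil => rfl
  | cons sw rest ih =>
    simp only [List.foldl_cons, podsOf, List.filterMap_cons]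
    cases PySem.Dict.get? (PySem.Dict.mk sw) "pod" with
    | none => exact ih s0
    | some p => simpa [podsOf] using ih (PySem.Set.add s0 p)

lemma foldB_eq (switches : List (List (String × Int))) (s0 : List Int) :
    switches.foldl (fun pods sw =>
      match PySem.Dict.get? (PySem.Dict.mk sw) "pod" with
      | some p => podInsert p pods
      | none => pods) s0
    = (podsOf switches).foldl (fun acc p => podInsert p acc) s0 := by
  induction switches generalizing s0 with
  | nil => rfl
  | cons sw rest ih =>
    simp only [List.foldl_cons, podsOf, List.filterMap_cons]
    cases PySem.Dict.get? (PySem.Dict.mk sw) "pod" with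
    | none => exact ih s0
    | some p => simpa [podsOf] using ih (podInsert p s0)

lemma mem_podInsert (y p : Int) (acc : List Int) :
    y ∈ podInsert p acc ↔ y = p ∨ y ∈ acc := by
  induction acc with
  | nil => simp [podInsert]
  | cons q qs ih =>
    by_cases h1 : q < p
    · simp only [podInsert, if_pos h1, List.mem_cons, ih]; tauto
    · by_cases h2 : q = p
      · subst h2; simp [podInsert]
      · simp only [podInsert, if_neg h1, if_neg h2, List.mem_cons]

lemma pairwise_podInsert (p : Int) (acc : List Int)
    (h : acc.Pairwise (· < ·)) : (podInsert p acc).Pairwise (· < ·) := by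
  induction acc with
  | nil => simp [podInsert]
  | cons q qs ih =>
    rcases List.pairwise_cons.mp h with ⟨hq, hqs⟩
    by_cases h1 : q < p
    · simp only [podInsert, if_pos h1]
      refine List.pairwise_cons.mpr ⟨?_, ih hqs⟩
      intro y hy
      rcases (mem_podInsert y p qs).mp hy with rfl | hy'
      · exact h1
      · exact hq y hy'
    · by_cases h2 : q = p
      · subst h2; simpa [podInsert, h1] using h
      · simp only [podInsert, if_neg h1, if_neg h2]
        refine List.pairwise_cons.mpr ⟨?_, h⟩
        intro y hy
        rcases List.mem_cons.mp hy with rfl | hy'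
        · omega
        · exact lt_of_lt_of_le (by omega : p < q) (le_of_lt (hq y hy'))

lemma foldB_mem (L : List Int) (y : Int) :
    y ∈ L.foldl (fun acc p => podInsert p acc) [] ↔ y ∈ L := by
  suffices h : ∀ (acc : List Int), y ∈ L.foldl (fun acc p => podInsert p acc) acc ↔ y ∈ acc ∨ y ∈ L by
    simpa using h []
  induction L with
  | nil => simp
  | cons p rest ih =>
    intro acc
    simp only [List.foldl_cons, ih, mem_podInsert, List.mem_cons]
    tauto

lemma foldB_pairwise (L : List Int) :
    (L.foldl (fun acc p => podInsert p acc) []).Pairwise (· < ·) := by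
  suffices h : ∀ (acc : List Int), acc.Pairwise (· < ·) →
      (L.foldl (fun acc p => podInsert p acc) acc).Pairwise (· < ·) by
    exact h [] (by simp)
  induction L with
  | nil => intro acc h; simpa using h
  | cons p rest ih =>
    intro acc h
    exact ih _ (pairwise_podInsert p acc h)

lemma foldB_eq_sorted_ofList (L : List Int) :
    PySem.List.sorted (PySem.Set.ofList L) (fun x => x) false
      = L.foldl (fun acc p => podInsert p acc) [] := by
  apply PySem.List.sorted_eq_of_perm_of_pairwise_lt
  · apply (List.perm_ext_iff_of_nodup ?_ ?_).mpr
    · intro a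
      rw [foldB_mem]
      exact (PySem.Set.mem_ofList L a).symm
    · exact (foldB_pairwise L).imp ne_of_lt
    · exact PySem.Set.nodup_ofList L
  · exact foldB_pairwise L

lemma ofList_eq_nil_iff (L : List Int) : PySem.Set.ofList L = [] ↔ L = [] := by
  constructor
  · intro h
    cases L with
    | nil => rfl
    | cons a t =>
      exfalso
      have : a ∈ PySem.Set.ofList (a :: t) := (PySem.Set.mem_ofList (a :: t) a).mpr (by simp)
      simp [h] at this
  · intro h; subst h; rfl

-- ===== VERDICT (by name: the statement is the Claim_ definition above) =====
theorem build_pod_names_py_spec : Claim_equal_build_pod_names_py := by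
  intro switches _
  unfold Spec_build_pod_names_py build_pod_names_py build_pod_names_py_alt
  simp only [foldA_eq, foldB_eq, PySem.Set.empty]
  rw [← PySem.Set.ofList_eq_foldl]
  rw [← foldB_eq_sorted_ofList]
  by_cases hL : podsOf switches = []
  · simp [hL, PySem.Set.ofList, PySem.List.sorted_eq_nil_iff]
  · rw [if_neg (by simpa [ofList_eq_nil_iff] using hL)]
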